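-- pv_equiv track=rewrite | github.com/ermiyastesfaye-lab/A2SV_CP | A2SV G6 - Round #3 18-Feb-2025/E - Equalizing Arrays 271688.py | equalizing
-- ===== SOURCE A (Python) =====
-- def equalizing(arr1, arr2):
--     i = 0
--     j = 0
--     if sum(arr1) != sum(arr2):
--         return -1
--     sum1 = arr1[i]
--     sum2 = arr2[j]
--
--     ansF = len(arr1)
--     ansS = len(arr2)
--
--     while i < len(arr1) and j < len(arr2):
--         if sum1 == sum2:
--             i+=1
--             j+=1
--             if i < len(arr1) and j < len(arr2):
--                 sum1 = arr1[i]
--                 sum2 = arr2[j]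
--         else:
--             if sum1 < sum2:
--                 if i + 1 < len(arr1):
--                     sum1+=arr1[i+1]
--
--                     ansF-=1
--                     i+=1
--                 else:
--                     break
--             elif sum1 > sum2:
--                 if j + 1 < len(arr2):
--                     sum2+=arr2[j+1]
--
--                     ansS-=1
--                     j+=1
--                 else:
--                     break
--     if ansF != ansS:
--         return -1
--     return ansF
-- ===== SOURCE B (Python) =====
-- def _prefix_sums(arr):
--     out = []
--     t = 0
--     for x in arr:
--         t += x
--         out.append(t)
--     return out
--
--
-- def equalizing(arr1, arr2):
--     if sum(arr1) != sum(arr2):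
--         return -1
--     # stacks of global prefix sums, top of stack = earliest prefix sum
--     s1 = _prefix_sums(arr1)[::-1]
--     s2 = _prefix_sums(arr2)[::-1]
--     a1 = 0  # merges performed inside arr1
--     a2 = 0  # merges performed inside arr2
--     while s1 and s2:
--         if s1[-1] == s2[-1]:
--             s1.pop()
--             s2.pop()
--         elif s1[-1] < s2[-1]:
--             if len(s1) > 1:
--                 s1.pop()
--                 a1 += 1
--             else:
--                 break
--         else:
--             if len(s2) > 1:
--                 s2.pop()
--                 a2 += 1
--             else:
--                 break
--     ans1 = len(arr1) - a1
--     ans2 = len(arr2) - a2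
--     if ans1 != ans2:
--         return -1
--     return ans1
-- ===== Notes on version B (the rewrite author's own statement) =====
-- stated objective: alternative
-- what changed: B precomputes the two global prefix-sum sequences once and then merges those two sequences directly (consuming them as stacks, counting merges per side), instead of A's interleaved two-pointer walk that maintains running segment sums, re-reads elements on every match and decrements two length counters.
import Mathlib
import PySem

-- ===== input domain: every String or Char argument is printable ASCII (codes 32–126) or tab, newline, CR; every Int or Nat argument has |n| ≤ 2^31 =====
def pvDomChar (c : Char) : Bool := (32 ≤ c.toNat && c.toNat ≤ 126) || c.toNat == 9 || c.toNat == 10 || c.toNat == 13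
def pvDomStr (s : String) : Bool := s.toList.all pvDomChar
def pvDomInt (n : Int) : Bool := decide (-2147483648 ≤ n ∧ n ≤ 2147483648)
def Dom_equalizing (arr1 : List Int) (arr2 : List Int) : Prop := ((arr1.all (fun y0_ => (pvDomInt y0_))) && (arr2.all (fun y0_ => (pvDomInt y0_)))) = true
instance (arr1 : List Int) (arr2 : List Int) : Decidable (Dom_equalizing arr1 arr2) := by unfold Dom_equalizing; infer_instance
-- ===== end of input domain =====

-- B replaces A's interleaved running-segment-sum two-pointer walk by two precomputed
-- global prefix-sum sequences merged directly; same cost, plainer structure.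


-- ===== PORT A =====
-- A's while loop; state is (i, j, sum1, sum2, ansF, ansS); the two 'break's return the pair.
-- (In the unequal branch Python tests 'elif sum1 > sum2'; for the total order on Int this is
-- exactly the remaining case, so it is transliterated as 'else'.)
def loopA (arr1 arr2 : List Int) (i j : Nat) (sum1 sum2 ansF ansS : Int) : Int × Int :=
  if h : i < arr1.length ∧ j < arr2.length then
    if sum1 = sum2 then
      if i + 1 < arr1.length ∧ j + 1 < arr2.length then
        loopA arr1 arr2 (i+1) (j+1) (arr1.getD (i+1) 0) (arr2.getD (j+1) 0) ansF ansS
      else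
        loopA arr1 arr2 (i+1) (j+1) sum1 sum2 ansF ansS
    else if sum1 < sum2 then
      if i + 1 < arr1.length then
        loopA arr1 arr2 (i+1) j (sum1 + arr1.getD (i+1) 0) sum2 (ansF - 1) ansS
      else (ansF, ansS)
    else
      if j + 1 < arr2.length then
        loopA arr1 arr2 i (j+1) sum1 (sum2 + arr2.getD (j+1) 0) ansF (ansS - 1)
      else (ansF, ansS)
  else (ansF, ansS)
termination_by arr1.length - i + (arr2.length - j)
decreasing_by all_goals omega

def equalizing (arr1 : List Int) (arr2 : List Int) : Int :=
  if arr1.sum ≠ arr2.sum then -1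
  else
    -- arr1[0] / arr2[0]: in range on Pre_ (both arrays nonempty when the sums agree)
    let res := loopA arr1 arr2 0 0 (arr1.getD 0 0) (arr2.getD 0 0) arr1.length arr2.length
    if res.1 ≠ res.2 then -1 else res.1

-- ===== PORT B =====
-- _prefix_sums(arr), running total t
def prefixSums (t : Int) : List Int → List Int
  | [] => []
  | x :: xs => (t + x) :: prefixSums (t + x) xs

-- Source B's while loop pops the reversed stacks from the top, i.e. consumes the prefix-sum
-- lists from the front: ported as recursion on the two lists; s[-1] is the head,
-- 'len(s) > 1' is '0 < length of the tail', the two 'break's return (a1, a2).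
def mergeCount : List Int → List Int → Int → Int → Int × Int
  | x :: xs, y :: ys, a1, a2 =>
    if x = y then mergeCount xs ys a1 a2
    else if x < y then
      if 0 < xs.length then mergeCount xs (y :: ys) (a1 + 1) a2 else (a1, a2)
    else
      if 0 < ys.length then mergeCount (x :: xs) ys a1 (a2 + 1) else (a1, a2)
  | _, _, a1, a2 => (a1, a2)
termination_by xs ys _ _ => xs.length + ys.length

def equalizing_alt (arr1 : List Int) (arr2 : List Int) : Int :=
  if arr1.sum ≠ arr2.sum then -1
  else
    let r := mergeCount (prefixSums 0 arr1) (prefixSums 0 arr2) 0 0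
    let ans1 := (arr1.length : Int) - r.1
    let ans2 := (arr2.length : Int) - r.2
    if ans1 ≠ ans2 then -1 else ans1

-- ===== PRECONDITION & SPEC =====
-- Pre_ excludes exactly the inputs where A raises IndexError: equal sums with an empty array.
def Pre_equalizing (arr1 : List Int) (arr2 : List Int) : Prop :=
  arr1.sum = arr2.sum → (arr1 ≠ [] ∧ arr2 ≠ [])
instance (arr1 : List Int) (arr2 : List Int) : Decidable (Pre_equalizing arr1 arr2) := by
  unfold Pre_equalizing; infer_instance
def pvWitness_equalizing : List Int × List Int := ([1, 2], [3])

def Spec_equalizing (arr1 : List Int) (arr2 : List Int) (out : Int) : Prop := out = equalizing_alt arr1 arr2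
instance (arr1 : List Int) (arr2 : List Int) (out : Int) : Decidable (Spec_equalizing arr1 arr2 out) := by unfold Spec_equalizing; infer_instance

-- ===== CLAIM (what is proved, stated in full; the proofs are below) =====
def Claim_equal_equalizing : Prop := ∀ (arr1 : List Int) (arr2 : List Int), Dom_equalizing arr1 arr2 → Pre_equalizing arr1 arr2 → Spec_equalizing arr1 arr2 (equalizing arr1 arr2)


-- ===== LEMMAS AND PROOFS =====

theorem length_prefixSums (t : Int) (arr : List Int) : (prefixSums t arr).length = arr.length := by
  induction arr generalizing t with
  | nil => rfl
  | cons x xs ih => simp [prefixSums, ih]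

theorem prefixSums_getD_zero (t : Int) (arr : List Int) (h : arr ≠ []) :
    (prefixSums t arr).getD 0 0 = t + arr.getD 0 0 := by
  cases arr with
  | nil => exact absurd rfl h
  | cons x xs => rfl

theorem prefixSums_getD_succ (t : Int) (arr : List Int) (i : Nat) (h : i + 1 < arr.length) :
    (prefixSums t arr).getD (i+1) 0 = (prefixSums t arr).getD i 0 + arr.getD (i+1) 0 := by
  induction arr generalizing t i with
  | nil => simp at h
  | cons x xs ih =>
    cases i with
    | zero =>
      have hxs : xs ≠ [] := by
        intro hn; rw [hn] at h; simp at h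
      simpa [prefixSums] using prefixSums_getD_zero (t + x) xs hxs
    | succ k =>
      have hk : k + 1 < xs.length := by simpa using h
      simpa [prefixSums] using ih (t + x) k hk

theorem key (arr1 arr2 : List Int) :
    ∀ (N i j : Nat) (d a1 a2 : Int),
      arr1.length - i + (arr2.length - j) ≤ N →
      i < arr1.length → j < arr2.length →
      loopA arr1 arr2 i j ((prefixSums 0 arr1).getD i 0 - d) ((prefixSums 0 arr2).getD j 0 - d)
        ((arr1.length : Int) - a1) ((arr2.length : Int) - a2)
      = ((arr1.length : Int) - (mergeCount ((prefixSums 0 arr1).drop i) ((prefixSums 0 arr2).drop j) a1 a2).1,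
         (arr2.length : Int) - (mergeCount ((prefixSums 0 arr1).drop i) ((prefixSums 0 arr2).drop j) a1 a2).2) := by
  intro N
  induction N with
  | zero => intro i j d a1 a2 hN hi hj; omega
  | succ N ih =>
    intro i j d a1 a2 hN hi hj
    have hP1 : (prefixSums 0 arr1).length = arr1.length := length_prefixSums 0 arr1
    have hP2 : (prefixSums 0 arr2).length = arr2.length := length_prefixSums 0 arr2
    have hi' : i < (prefixSums 0 arr1).length := by omega
    have hj' : j < (prefixSums 0 arr2).length := by omega
    have hd1 : (prefixSums 0 arr1).drop i = (prefixSums 0 arr1).getD i 0 :: (prefixSums 0 arr1).drop (i+1) := by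
      rw [List.drop_eq_getElem_cons hi', List.getD_eq_getElem _ 0 hi']
    have hd2 : (prefixSums 0 arr2).drop j = (prefixSums 0 arr2).getD j 0 :: (prefixSums 0 arr2).drop (j+1) := by
      rw [List.drop_eq_getElem_cons hj', List.getD_eq_getElem _ 0 hj']
    rw [loopA]
    rw [dif_pos (And.intro hi hj), hd1, hd2, mergeCount]
    by_cases heq : (prefixSums 0 arr1).getD i 0 = (prefixSums 0 arr2).getD j 0
    · -- equal branch
      have hs : (prefixSums 0 arr1).getD i 0 - d = (prefixSums 0 arr2).getD j 0 - d := by omega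
      rw [if_pos hs, if_pos heq]
      by_cases hin : i + 1 < arr1.length ∧ j + 1 < arr2.length
      · rw [if_pos hin]
        have e1 : arr1.getD (i+1) 0
            = (prefixSums 0 arr1).getD (i+1) 0 - (prefixSums 0 arr1).getD i 0 := by
          have := prefixSums_getD_succ 0 arr1 i hin.1; omega
        have e2 : arr2.getD (j+1) 0
            = (prefixSums 0 arr2).getD (j+1) 0 - (prefixSums 0 arr1).getD i 0 := by
          have := prefixSums_getD_succ 0 arr2 j hin.2; omega
        rw [e1, e2]
        exact ih (i+1) (j+1) ((prefixSums 0 arr1).getD i 0) a1 a2 (by omega) hin.1 hin.2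
      · rw [if_neg hin, loopA, dif_neg hin]
        rcases Nat.lt_or_ge (i+1) arr1.length with h1 | h1
        · have hnil : (prefixSums 0 arr2).drop (j+1) = [] := List.drop_eq_nil_of_le (by omega)
          rw [hnil]
          cases hc : (prefixSums 0 arr1).drop (i+1) with
          | nil => simp [mergeCount]
          | cons z zs => simp [mergeCount]
        · have hnil : (prefixSums 0 arr1).drop (i+1) = [] := List.drop_eq_nil_of_le (by omega)
          rw [hnil]
          cases hc : (prefixSums 0 arr2).drop (j+1) with
          | nil => simp [mergeCount]
          | cons z zs => simp [mergeCount]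
    · have hs : ¬ ((prefixSums 0 arr1).getD i 0 - d = (prefixSums 0 arr2).getD j 0 - d) := by omega
      rw [if_neg hs, if_neg heq]
      by_cases hlt : (prefixSums 0 arr1).getD i 0 < (prefixSums 0 arr2).getD j 0
      · -- sum1 < sum2
        have hs2 : (prefixSums 0 arr1).getD i 0 - d < (prefixSums 0 arr2).getD j 0 - d := by omega
        rw [if_pos hs2, if_pos hlt]
        by_cases h1 : i + 1 < arr1.length
        · rw [if_pos h1, if_pos (show 0 < ((prefixSums 0 arr1).drop (i+1)).length by
            rw [List.length_drop]; omega)]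
          have e1 : (prefixSums 0 arr1).getD i 0 - d + arr1.getD (i+1) 0
              = (prefixSums 0 arr1).getD (i+1) 0 - d := by
            have := prefixSums_getD_succ 0 arr1 i h1; omega
          have e2 : (arr1.length : Int) - a1 - 1 = (arr1.length : Int) - (a1 + 1) := by omega
          rw [e1, e2, ← hd2]
          exact ih (i+1) j d (a1+1) a2 (by omega) h1 hj
        · rw [if_neg h1, if_neg (show ¬ 0 < ((prefixSums 0 arr1).drop (i+1)).length by
            rw [List.length_drop]; omega)]
      · -- sum1 > sum2
        have hs2 : ¬ ((prefixSums 0 arr1).getD i 0 - d < (prefixSums 0 arr2).getD j 0 - d) := by omega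
        rw [if_neg hs2, if_neg hlt]
        by_cases h2 : j + 1 < arr2.length
        · rw [if_pos h2, if_pos (show 0 < ((prefixSums 0 arr2).drop (j+1)).length by
            rw [List.length_drop]; omega)]
          have e1 : (prefixSums 0 arr2).getD j 0 - d + arr2.getD (j+1) 0
              = (prefixSums 0 arr2).getD (j+1) 0 - d := by
            have := prefixSums_getD_succ 0 arr2 j h2; omega
          have e2 : (arr2.length : Int) - a2 - 1 = (arr2.length : Int) - (a2 + 1) := by omega
          rw [e1, e2, ← hd1]
          exact ih i (j+1) d a1 (a2+1) (by omega) hi h2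
        · rw [if_neg h2, if_neg (show ¬ 0 < ((prefixSums 0 arr2).drop (j+1)).length by
            rw [List.length_drop]; omega)]

-- ===== VERDICT (by name: the statement is the Claim_ definition above) =====
theorem equalizing_spec : Claim_equal_equalizing := by
  intro arr1 arr2 _ hpre
  unfold Spec_equalizing equalizing equalizing_alt
  by_cases hsum : arr1.sum = arr2.sum
  · obtain ⟨h1, h2⟩ := hpre hsum
    have hn : 0 < arr1.length := List.length_pos_iff.mpr h1
    have hm : 0 < arr2.length := List.length_pos_iff.mpr h2
    have hne : ¬ (arr1.sum ≠ arr2.sum) := by simpa using hsum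
    simp only [if_neg hne]
    have hk := key arr1 arr2 (arr1.length + arr2.length) 0 0 0 0 0 (by omega) hn hm
    simp only [List.drop_zero, sub_zero] at hk
    have e1 : arr1.getD 0 0 = (prefixSums 0 arr1).getD 0 0 := by
      rw [prefixSums_getD_zero 0 arr1 h1]; ring
    have e2 : arr2.getD 0 0 = (prefixSums 0 arr2).getD 0 0 := by
      rw [prefixSums_getD_zero 0 arr2 h2]; ring
    rw [e1, e2, hk]
  · simp only [if_pos hsum]
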